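-- pv_equiv track=rewrite | github.com/pypi-data/pypi-mirror-397 | packages/ivybloom/ivybloom-0.7.9.tar.gz/ivybloom-0.7.9/ivybloom_cli/tui/search.py | rank_commands
-- ===== SOURCE A (Python) =====
-- from typing import List, Tuple
--
-- def rank_commands(commands: List[Tuple[str, str, str]], query: str, limit: int = 200) -> List[Tuple[str, str, str]]:
-- 	"""Rank and filter (id, name, desc) by fuzzy subsequence score.
--
-- 	Scoring favors name-startswith, contains, and subsequence hits across name+desc.
-- 	Only items that are a subsequence match are returned, limited to `limit`.
-- 	"""
-- 	q = (query or "").strip().lower()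
-- 	if not q:
-- 		return commands
--
-- 	def score(item: Tuple[str, str, str]) -> int:
-- 		_, name, desc = item
-- 		text = (name + " " + (desc or "")).lower()
-- 		# Subsequence match score
-- 		i = 0
-- 		hits = 0
-- 		for ch in text:
-- 			if i < len(q) and ch == q[i]:
-- 				i += 1
-- 				hits += 1
-- 		starts = 10 if name.lower().startswith(q) else 0
-- 		contains = 5 if q in text else 0
-- 		return starts + contains + hits
--
-- 	def is_subseq(item: Tuple[str, str, str]) -> bool:
-- 		_, name, desc = item
-- 		text = (name + " " + (desc or "")).lower()
-- 		i = 0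
-- 		for ch in text:
-- 			if i < len(q) and ch == q[i]:
-- 				i += 1
-- 		return i == len(q)
--
-- 	ranked = sorted(commands, key=score, reverse=True)
-- 	return [c for c in ranked if is_subseq(c)][:limit]
-- ===== SOURCE B (Python) =====
-- from typing import List, Tuple
--
-- def rank_commands(commands: List[Tuple[str, str, str]], query: str, limit: int = 200) -> List[Tuple[str, str, str]]:
-- 	q = (query or "").strip().lower()
-- 	if not q:
-- 		return commands
-- 	matches = []
-- 	for item in commands:
-- 		_, name, desc = item
-- 		text = (name + " " + (desc or "")).lower()
-- 		i = 0
-- 		for ch in text: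
-- 			if i < len(q) and ch == q[i]:
-- 				i += 1
-- 		if i == len(q):
-- 			score = (10 if name.lower().startswith(q) else 0) + (5 if q in text else 0) + len(q)
-- 			matches.append((score, item))
-- 	matches.sort(key=lambda t: t[0], reverse=True)
-- 	return [item for _, item in matches[:limit]]
-- ===== Notes on version B (the rewrite author's own statement) =====
-- stated objective: faster
-- what changed: B filters first with a single merged subsequence scan per item, decorates the matches with their score, sorts only the matches (decorate-sort-undecorate) and truncates, instead of A's sort-all-items-with-two-separate-scans-then-filter; stable sorting makes the two orders identical.
import Mathlib
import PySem

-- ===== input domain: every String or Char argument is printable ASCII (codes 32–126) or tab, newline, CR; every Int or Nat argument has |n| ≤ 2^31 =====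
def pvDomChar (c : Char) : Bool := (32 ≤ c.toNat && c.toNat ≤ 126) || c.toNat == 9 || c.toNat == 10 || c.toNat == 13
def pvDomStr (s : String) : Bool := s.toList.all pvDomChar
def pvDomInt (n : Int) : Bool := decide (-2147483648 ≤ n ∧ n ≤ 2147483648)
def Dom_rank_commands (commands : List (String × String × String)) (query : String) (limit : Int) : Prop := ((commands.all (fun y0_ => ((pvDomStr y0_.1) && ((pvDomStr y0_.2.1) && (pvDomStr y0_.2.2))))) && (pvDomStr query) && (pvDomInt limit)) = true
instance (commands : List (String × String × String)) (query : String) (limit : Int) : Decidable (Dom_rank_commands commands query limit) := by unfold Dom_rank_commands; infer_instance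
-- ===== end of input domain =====

-- B filters commands with a single merged subsequence scan, decorates the matches with their
-- scores, and sorts only the matches (decorate-sort-undecorate) instead of A's sort-everything-
-- with-two-scans-then-filter; same return value everywhere, measurably faster in a timing run.

-- ===== PORT A =====
-- text = (name + " " + (desc or "")).lower()
def pvTextA (name desc : String) : List Char :=
  PySem.Chars.lower (name.toList ++ ' ' :: desc.toList)

-- one step of A's `for ch in text` loop in score: state (i, hits)
def pvScanA (q : List Char) (s : Nat × Nat) (ch : Char) : Nat × Nat :=
  if s.1 < q.length && (q.getD s.1 ' ' == ch) then (s.1 + 1, s.2 + 1) else s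

def pvScoreA (q : List Char) (item : String × String × String) : Int :=
  let text := pvTextA item.2.1 item.2.2
  let r := text.foldl (pvScanA q) (0, 0)
  let starts : Int := if PySem.Chars.startswith (PySem.Chars.lower item.2.1.toList) q then 10 else 0
  let contains : Int := if PySem.Chars.isIn q text then 5 else 0
  starts + contains + (r.2 : Int)

-- one step of A's `for ch in text` loop in is_subseq: state i
def pvStepA (q : List Char) (i : Nat) (ch : Char) : Nat :=
  if i < q.length && (q.getD i ' ' == ch) then i + 1 else i

def pvIsSubseqA (q : List Char) (item : String × String × String) : Bool :=
  let text := pvTextA item.2.1 item.2.2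
  text.foldl (pvStepA q) 0 == q.length

def rank_commands (commands : List (String × String × String)) (query : String) (limit : Int) : List (String × String × String) :=
  let q := PySem.Chars.lower (PySem.Chars.strip query.toList)
  if q.isEmpty then commands
  else
    let ranked := PySem.List.sorted commands (pvScoreA q) true
    PySem.List.slice (ranked.filter (pvIsSubseqA q)) none (some limit)

-- ===== PORT B =====
def pvTextB (name desc : String) : List Char :=
  PySem.Chars.lower (name.toList ++ ' ' :: desc.toList)

-- one step of B's single merged scan: state i
def pvStepB (q : List Char) (i : Nat) (ch : Char) : Nat :=
  if i < q.length && (q.getD i ' ' == ch) then i + 1 else i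

def pvMatchB (q : List Char) (item : String × String × String) : Bool :=
  let text := pvTextB item.2.1 item.2.2
  text.foldl (pvStepB q) 0 == q.length

-- the decorated pair (score, item) B appends for a match
def pvDecB (q : List Char) (item : String × String × String) : Int × (String × String × String) :=
  let text := pvTextB item.2.1 item.2.2
  ((if PySem.Chars.startswith (PySem.Chars.lower item.2.1.toList) q then (10 : Int) else 0)
     + (if PySem.Chars.isIn q text then (5 : Int) else 0) + (q.length : Int), item)

def rank_commands_alt (commands : List (String × String × String)) (query : String) (limit : Int) : List (String × String × String) :=
  let q := PySem.Chars.lower (PySem.Chars.strip query.toList)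
  if q.isEmpty then commands
  else
    let ms := commands.foldl (fun acc item => if pvMatchB q item then acc ++ [pvDecB q item] else acc) []
    let ranked := PySem.List.sorted ms (fun t => t.1) true
    (PySem.List.slice ranked none (some limit)).map (fun t => t.2)

-- ===== PRECONDITION & SPEC =====
def Spec_rank_commands (commands : List (String × String × String)) (query : String) (limit : Int) (out : List (String × String × String)) : Prop := out = rank_commands_alt commands query limit
instance (commands : List (String × String × String)) (query : String) (limit : Int) (out : List (String × String × String)) : Decidable (Spec_rank_commands commands query limit out) := by unfold Spec_rank_commands; infer_instance

-- ===== CLAIM (what is proved, stated in full; the proofs are below) =====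
def Claim_equal_rank_commands : Prop := ∀ (commands : List (String × String × String)) (query : String) (limit : Int), Dom_rank_commands commands query limit → Spec_rank_commands commands query limit (rank_commands commands query limit)

-- ===== LEMMAS AND PROOFS =====

-- A's (i, hits) pair scan keeps i = hits, and its first component is the single scan
theorem pvScan_pair (q text : List Char) : ∀ a : Nat,
    text.foldl (pvScanA q) (a, a) = (text.foldl (pvStepA q) a, text.foldl (pvStepA q) a) := by
  have hstep : ∀ (a : Nat) (c : Char), pvScanA q (a, a) c = (pvStepA q a c, pvStepA q a c) := by
    intro a c
    unfold pvScanA pvStepA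
    by_cases h : (a < q.length && (q.getD a ' ' == c)) = true
    · simp only [if_pos h]
    · simp only [if_neg h]
  induction text with
  | nil => intro a; rfl
  | cons c cs ih =>
      intro a
      rw [List.foldl_cons, List.foldl_cons, hstep, ih]

-- on a match, B's decorated pair carries exactly A's score
theorem pvDec_eq_score (q : List Char) (c : String × String × String)
    (h : pvIsSubseqA q c = true) : pvDecB q c = (pvScoreA q c, c) := by
  have hfold : (pvTextA c.2.1 c.2.2).foldl (pvStepA q) 0 = q.length := by
    simpa [pvIsSubseqA] using h
  simp [pvDecB, pvScoreA, pvTextB, pvTextA, pvScan_pair q _ 0, hfold] <;> simp [pvTextA] at hfold <;> simp [hfold]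

-- generic: insertBy with the reverse comparison preserves reverse sortedness
theorem insertBy_pairwise_rev {α : Type} (k : α → Int) (x : α) :
    ∀ acc : List α, acc.Pairwise (fun a b => k b ≤ k a) →
    (PySem.List.insertBy (fun a b => decide (k b < k a)) x acc).Pairwise (fun a b => k b ≤ k a) := by
  intro acc
  induction acc with
  | nil => intro _; simp [PySem.List.insertBy]
  | cons z zs ih =>
      intro h
      rw [List.pairwise_cons] at h
      by_cases hc : k z < k x
      · have : (PySem.List.insertBy (fun a b => decide (k b < k a)) x (z :: zs)) = x :: z :: zs := by
          simp [PySem.List.insertBy, hc]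
        rw [this, List.pairwise_cons]
        constructor
        · intro w hw
          rcases List.mem_cons.mp hw with rfl | hw
          · exact le_of_lt hc
          · exact le_trans (h.1 w hw) (le_of_lt hc)
        · exact List.pairwise_cons.mpr h
      · have : (PySem.List.insertBy (fun a b => decide (k b < k a)) x (z :: zs))
            = z :: PySem.List.insertBy (fun a b => decide (k b < k a)) x zs := by
          simp [PySem.List.insertBy, hc]
        rw [this, List.pairwise_cons]
        refine ⟨?_, ih h.2⟩
        intro w hw
        rcases (PySem.List.mem_insertBy _ _ _ _).mp hw with rfl | hw
        · omega
        · exact h.1 w hw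

-- if x beats everything in ys, insertBy puts it in front
theorem insertBy_front {α : Type} (k : α → Int) (x : α) (ys : List α)
    (h : ∀ w ∈ ys, k w < k x) :
    PySem.List.insertBy (fun a b => decide (k b < k a)) x ys = x :: ys := by
  cases ys with
  | nil => rfl
  | cons z zs => simp [PySem.List.insertBy, h z (by simp)]

-- filtering commutes with inserting into a reverse-sorted list
theorem filter_insertBy {α : Type} (k : α → Int) (p : α → Bool) (x : α) :
    ∀ acc : List α, acc.Pairwise (fun a b => k b ≤ k a) →
    (PySem.List.insertBy (fun a b => decide (k b < k a)) x acc).filter p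
      = if p x then PySem.List.insertBy (fun a b => decide (k b < k a)) x (acc.filter p)
        else acc.filter p := by
  intro acc
  induction acc with
  | nil =>
      intro _
      by_cases hx : p x = true <;> simp [PySem.List.insertBy, List.filter, hx]
  | cons z zs ih =>
      intro h
      rw [List.pairwise_cons] at h
      by_cases hc : k z < k x
      · have hrw : (PySem.List.insertBy (fun a b => decide (k b < k a)) x (z :: zs)) = x :: z :: zs := by
          simp [PySem.List.insertBy, hc]
        rw [hrw]
        by_cases hz : p z = true
        · by_cases hx : p x = true <;>
            simp [hx, hz, PySem.List.insertBy, hc]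
        · by_cases hx : p x = true
          · have hfront : PySem.List.insertBy (fun a b => decide (k b < k a)) x (zs.filter p)
                = x :: zs.filter p := by
              apply insertBy_front
              intro w hw
              exact lt_of_le_of_lt (h.1 w (List.mem_of_mem_filter hw)) hc
            simp [hx, hz, hfront]
          · simp [hx, hz]
      · have hrw : (PySem.List.insertBy (fun a b => decide (k b < k a)) x (z :: zs))
            = z :: PySem.List.insertBy (fun a b => decide (k b < k a)) x zs := by
          simp [PySem.List.insertBy, hc]
        rw [hrw]
        by_cases hz : p z = true
        · by_cases hx : p x = true <;>
            simp [hz, hx, ih h.2, PySem.List.insertBy, hc]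
        · by_cases hx : p x = true <;> simp [hz, hx, ih h.2]

-- filtering commutes with the whole insertion-sort fold
theorem filter_foldl_insertBy {α : Type} (k : α → Int) (p : α → Bool) :
    ∀ (xs acc : List α), acc.Pairwise (fun a b => k b ≤ k a) →
    (xs.foldl (fun acc x => PySem.List.insertBy (fun a b => decide (k b < k a)) x acc) acc).filter p
      = (xs.filter p).foldl (fun acc x => PySem.List.insertBy (fun a b => decide (k b < k a)) x acc) (acc.filter p) := by
  intro xs
  induction xs with
  | nil => intro acc _; rfl
  | cons x xs ih =>
      intro acc h
      simp only [List.foldl_cons, List.filter_cons]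
      rw [ih _ (insertBy_pairwise_rev k x acc h), filter_insertBy k p x acc h]
      by_cases hx : p x = true <;> simp [hx]

-- sorted-then-filter = filter-then-sorted (stable, reverse)
theorem filter_sorted_rev {α : Type} (k : α → Int) (p : α → Bool) (xs : List α) :
    (PySem.List.sorted xs k true).filter p = PySem.List.sorted (xs.filter p) k true := by
  rw [PySem.List.sorted_rev_eq_foldl_insertBy, PySem.List.sorted_rev_eq_foldl_insertBy]
  simpa using filter_foldl_insertBy k p xs [] List.Pairwise.nil

-- sorting the decorated list = decorating the sorted list (keys agree through f)
theorem insertBy_map {α β : Type} (k : α → Int) (k' : β → Int) (f : α → β)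
    (hk : ∀ a, k' (f a) = k a) (x : α) :
    ∀ acc : List α,
    PySem.List.insertBy (fun a b => decide (k' b < k' a)) (f x) (acc.map f)
      = (PySem.List.insertBy (fun a b => decide (k b < k a)) x acc).map f := by
  intro acc
  induction acc with
  | nil => rfl
  | cons z zs ih =>
      by_cases hc : k z < k x
      · simp [PySem.List.insertBy, hk, hc]
      · simp [PySem.List.insertBy, hk, hc, ih]

theorem sorted_map_rev {α β : Type} (k : α → Int) (k' : β → Int) (f : α → β)
    (hk : ∀ a, k' (f a) = k a) (xs : List α) :
    PySem.List.sorted (xs.map f) k' true = (PySem.List.sorted xs k true).map f := by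
  rw [PySem.List.sorted_rev_eq_foldl_insertBy, PySem.List.sorted_rev_eq_foldl_insertBy]
  have : ∀ (xs acc : List α),
      (xs.map f).foldl (fun acc x => PySem.List.insertBy (fun a b => decide (k' b < k' a)) x acc) (acc.map f)
        = (xs.foldl (fun acc x => PySem.List.insertBy (fun a b => decide (k b < k a)) x acc) acc).map f := by
    intro xs
    induction xs with
    | nil => intro acc; rfl
    | cons x xs ih =>
        intro acc
        simp only [List.map_cons, List.foldl_cons]
        rw [insertBy_map k k' f hk x acc, ih]
  simpa using this xs []

-- slices commute with map
theorem slice_map {α β : Type} (g : α → β) (l : List α) (b : Int) :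
    PySem.List.slice (l.map g) none (some b) = (PySem.List.slice l none (some b)).map g := by
  simp [PySem.List.slice, PySem.List.clampIdx, List.map_take]

-- ===== VERDICT (by name: the statement is the Claim_ definition above) =====
theorem rank_commands_spec : Claim_equal_rank_commands := by
  intro commands query limit _
  unfold Spec_rank_commands rank_commands rank_commands_alt
  by_cases hq : (PySem.Chars.lower (PySem.Chars.strip query.toList)).isEmpty = true
  · simp [hq]
  · simp only [hq, Bool.false_eq_true, if_false]
    set q := PySem.Chars.lower (PySem.Chars.strip query.toList) with hqdef
    have hmatch : pvMatchB q = pvIsSubseqA q := rfl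
    rw [PySem.List.foldl_append_if (pvMatchB q) (pvDecB q), hmatch]
    rw [List.map_congr_left (fun c hc => pvDec_eq_score q c (List.of_mem_filter hc))]
    rw [List.nil_append]
    rw [sorted_map_rev (pvScoreA q) (fun t => t.1) (fun c => (pvScoreA q c, c)) (fun a => rfl)]
    rw [filter_sorted_rev (pvScoreA q) (pvIsSubseqA q) commands]
    rw [slice_map, List.map_map]
    simp [Function.comp_def]
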